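-- pv_equiv track=rewrite | github.com/twoa0/python_assignment | square_permutation.py | permutation2
-- ===== SOURCE A (Python) =====
-- def permutation2(n,k):
--     a = 1
--     while k > 0:
--         if n >= k:
--            a = a*n
--            n,k = n-1,k-1
--         else:
--             return 0
--     return a
-- ===== SOURCE B (Python) =====
-- def _prod(lo, hi):
--     # product of all integers in [lo, hi], as a balanced product tree
--     if lo == hi:
--         return lo
--     mid = (lo + hi) // 2
--     return _prod(lo, mid) * _prod(mid + 1, hi)
--
-- def permutation2(n, k):
--     if k <= 0:
--         return 1
--     if n < k:
--         return 0
--     return _prod(n - k + 1, n)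
-- ===== Notes on version B (the rewrite author's own statement) =====
-- stated objective: alternative
-- what changed: Replaces A's sequential while-loop accumulating the falling product with guard cases (k<=0 -> 1, n<k -> 0) plus a recursive divide-and-conquer product tree over the integer range [n-k+1, n], which multiplies balanced halves instead of folding one factor at a time.
import Mathlib
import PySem

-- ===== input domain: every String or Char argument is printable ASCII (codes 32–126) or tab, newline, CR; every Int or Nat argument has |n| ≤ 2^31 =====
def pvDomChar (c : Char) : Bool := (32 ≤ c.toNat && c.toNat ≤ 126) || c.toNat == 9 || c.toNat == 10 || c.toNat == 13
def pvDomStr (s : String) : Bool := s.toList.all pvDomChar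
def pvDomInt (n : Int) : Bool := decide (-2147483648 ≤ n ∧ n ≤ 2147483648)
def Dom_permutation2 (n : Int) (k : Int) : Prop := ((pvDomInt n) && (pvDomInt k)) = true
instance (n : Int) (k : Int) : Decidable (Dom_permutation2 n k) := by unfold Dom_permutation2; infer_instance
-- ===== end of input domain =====

-- B replaces A's sequential accumulating falling-product loop with guard cases plus a divide-and-conquer product tree over [n-k+1, n]; alternative structure, no speed claim.

-- ===== PORT A =====
-- while k > 0: if n >= k: a = a*n; n,k = n-1,k-1 else: return 0
def permutation2.loop (n k a : Int) : Int :=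
  if 0 < k then
    if n ≥ k then permutation2.loop (n - 1) (k - 1) (a * n)
    else 0
  else a
termination_by k.toNat
decreasing_by omega

def permutation2 (n : Int) (k : Int) : Int := permutation2.loop n k 1

-- ===== PORT B =====
-- _prod(lo, hi): balanced product of the integers in [lo, hi].
-- Python's 'if lo == hi' base case is widened to 'hi ≤ lo' for totality only:
-- Python diverges when lo > hi, and B never calls _prod with lo > hi.
def pprod (lo hi : Int) : Int :=
  if hi ≤ lo then lo
  else pprod lo (PySem.Int.floordiv (lo + hi) 2) *
       pprod (PySem.Int.floordiv (lo + hi) 2 + 1) hi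
termination_by (hi - lo).toNat
decreasing_by
  all_goals
    have hb := PySem.Int.floordiv_two_mid_bounds (lo := lo) (hi := hi) (by omega)
    have hlt : PySem.Int.floordiv (lo + hi) 2 < hi := by
      rw [PySem.Int.floordiv_lt_iff_lt_mul (by omega)]
      omega
    omega

def permutation2_alt (n : Int) (k : Int) : Int :=
  if k ≤ 0 then 1
  else if n < k then 0
  else pprod (n - k + 1) n

-- ===== PRECONDITION & SPEC =====
def Spec_permutation2 (n : Int) (k : Int) (out : Int) : Prop := out = permutation2_alt n k
instance (n : Int) (k : Int) (out : Int) : Decidable (Spec_permutation2 n k out) := by unfold Spec_permutation2; infer_instance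

-- ===== CLAIM (what is proved, stated in full; the proofs are below) =====
def Claim_equal_permutation2 : Prop := ∀ (n : Int) (k : Int), Dom_permutation2 n k → Spec_permutation2 n k (permutation2 n k)

-- ===== LEMMAS AND PROOFS =====

theorem pprod_mul_factorial (j : Nat) : ∀ (lo hi : Int), (hi - lo).toNat = j → 1 ≤ lo → lo ≤ hi →
    pprod lo hi * ((lo - 1).toNat.factorial : Int) = (hi.toNat.factorial : Int) := by
  induction j using Nat.strong_induction_on with
  | _ j ih =>
    intro lo hi hj h1 h2
    rw [pprod]
    by_cases heq : hi ≤ lo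
    · rw [if_pos heq]
      have h6 : lo = hi := by omega
      subst h6
      have h4 : lo.toNat = (lo - 1).toNat + 1 := by omega
      rw [h4, Nat.factorial_succ]
      push_cast
      have h5 : ((lo - 1).toNat : Int) + 1 = lo := by omega
      rw [h5]
      try ring
    · rw [if_neg heq]
      have hb := PySem.Int.floordiv_two_mid_bounds (lo := lo) (hi := hi) (by omega)
      have hlt : PySem.Int.floordiv (lo + hi) 2 < hi := by
        rw [PySem.Int.floordiv_lt_iff_lt_mul (by omega)]
        omega
      have hL := ih ((PySem.Int.floordiv (lo + hi) 2) - lo).toNat (by omega) lo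
        (PySem.Int.floordiv (lo + hi) 2) rfl h1 hb.1
      have hR := ih (hi - (PySem.Int.floordiv (lo + hi) 2 + 1)).toNat (by omega)
        (PySem.Int.floordiv (lo + hi) 2 + 1) hi rfl (by omega) (by omega)
      have h7 : ((PySem.Int.floordiv (lo + hi) 2 + 1) - 1 : Int) = PySem.Int.floordiv (lo + hi) 2 := by ring
      rw [h7] at hR
      calc pprod lo (PySem.Int.floordiv (lo + hi) 2) *
             pprod (PySem.Int.floordiv (lo + hi) 2 + 1) hi * ((lo - 1).toNat.factorial : Int)
          = pprod (PySem.Int.floordiv (lo + hi) 2 + 1) hi *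
              (pprod lo (PySem.Int.floordiv (lo + hi) 2) * ((lo - 1).toNat.factorial : Int)) := by ring
        _ = pprod (PySem.Int.floordiv (lo + hi) 2 + 1) hi *
              ((PySem.Int.floordiv (lo + hi) 2).toNat.factorial : Int) := by rw [hL]
        _ = (hi.toNat.factorial : Int) := hR

theorem loop_mul_factorial (j : Nat) : ∀ (n k a : Int), k.toNat = j → 0 < k → k ≤ n →
    permutation2.loop n k a * ((n - k).toNat.factorial : Int) = a * (n.toNat.factorial : Int) := by
  induction j with
  | zero => intro n k a hj hk _; omega
  | succ j ih =>
    intro n k a hj hk hnk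
    rw [permutation2.loop]
    rw [if_pos hk, if_pos (by omega)]
    by_cases hk1 : k = 1
    · subst hk1
      rw [permutation2.loop, if_neg (by omega)]
      have h4 : n.toNat = (n - 1).toNat + 1 := by omega
      rw [h4, Nat.factorial_succ]
      push_cast
      have h5 : ((n - 1).toNat : Int) + 1 = n := by omega
      rw [h5]
      ring
    · have := ih (n - 1) (k - 1) (a * n) (by omega) (by omega) (by omega)
      rw [show (n - 1 - (k - 1) : Int) = n - k by ring] at this
      rw [this]
      have h4 : n.toNat = (n - 1).toNat + 1 := by omega
      rw [h4, Nat.factorial_succ]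
      push_cast
      have h5 : ((n - 1).toNat : Int) + 1 = n := by omega
      rw [h5]
      ring

-- ===== VERDICT (by name: the statement is the Claim_ definition above) =====
theorem permutation2_spec : Claim_equal_permutation2 := by
  intro n k _
  unfold Spec_permutation2 permutation2 permutation2_alt
  by_cases hk : k ≤ 0
  · rw [permutation2.loop, if_neg (by omega), if_pos hk]
  · rw [if_neg hk]
    by_cases hnk : n < k
    · rw [if_pos hnk, permutation2.loop, if_pos (by omega), if_neg (by omega)]
    · rw [if_neg hnk]
      have key := loop_mul_factorial k.toNat n k 1 rfl (by omega) (by omega)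
      rw [one_mul] at key
      have keyB := pprod_mul_factorial (n - (n - k + 1)).toNat (n - k + 1) n rfl (by omega) (by omega)
      rw [show (n - k + 1 - 1 : Int) = n - k by ring] at keyB
      have hdpos : (0 : Int) < ((n - k).toNat.factorial : Int) := by
        exact_mod_cast Nat.factorial_pos _
      exact mul_right_cancel₀ (by omega) (key.trans keyB.symm)
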